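-- pv_equiv track=rewrite | github.com/Helio66/Amazing-Journeys-of-Langton-s-Ant | decrypt_sentences.py | str2seq
-- ===== SOURCE A (Python) =====
-- def findmax(n):
--     i=0
--     maxi=0
--     while 2**i <= n:
--         maxi=i
--         i+=1
--     return maxi
--
-- def ten2two(n):
--     i=findmax(n)
--     n2=[0 for _ in range(7)]
--     while n!=0:
--         n2[i]=1
--         n-=2**i
--         i=findmax(n)
--     return n2
--
-- def str2seq(S, a):
--     L=[]
--     for s in S:
--         i=0
--         while s!=a[i]:
--             i+=1
--         n2=ten2two(i)
--         L.append(n2)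
--     return L
-- ===== SOURCE B (Python) =====
-- def str2seq(S, a):
--     L = []
--     for s in S:
--         i = 0
--         while s != a[i]:
--             i += 1
--         n2 = [0] * 7
--         for bit in range(i.bit_length()):
--             if (i >> bit) & 1:
--                 n2[bit] = 1
--         L.append(n2)
--     return L
-- ===== Notes on version B (the rewrite author's own statement) =====
-- stated objective: simpler
-- what changed: Replaces the findmax/ten2two greedy largest-power-of-two subtraction pair with a single inline positional bit test ((i >> bit) & 1) over range(i.bit_length()), removing both helper functions.
import Mathlib
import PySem

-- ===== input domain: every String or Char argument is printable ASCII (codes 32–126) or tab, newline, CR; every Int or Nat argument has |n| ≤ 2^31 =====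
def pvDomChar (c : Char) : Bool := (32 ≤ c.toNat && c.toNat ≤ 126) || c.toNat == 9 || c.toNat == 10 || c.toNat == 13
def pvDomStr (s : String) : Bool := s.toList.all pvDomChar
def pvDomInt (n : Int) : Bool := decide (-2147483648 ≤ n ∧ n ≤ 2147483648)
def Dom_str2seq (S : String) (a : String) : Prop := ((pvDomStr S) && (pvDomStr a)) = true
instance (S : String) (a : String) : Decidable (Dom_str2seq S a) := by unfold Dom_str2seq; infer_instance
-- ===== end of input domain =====

-- B inlines the index→7-bit conversion as a direct positional bit test, removing A's findmax/ten2two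
-- greedy power-of-two subtraction helpers (objective: simpler).

-- ===== PORT A =====
-- while 2**i <= n loop of findmax; fuel n.natAbs+1 suffices since 2^i > i always
def findmaxGo : Nat → Int → Nat → Nat → Nat
  | 0, _, _, maxi => maxi
  | f+1, n, i, maxi => if (2:Int)^i ≤ n then findmaxGo f n (i+1) i else maxi

def findmax (n : Int) : Nat := findmaxGo (n.natAbs + 1) n 0 0

-- while n != 0 loop of ten2two; n2[i]=1 via List.set (Python raises IndexError for i ≥ 7,
-- excluded by Pre_); fuel n.natAbs+1 covers all terminating runs (n ≥ 0)
def ten2twoGo : Nat → Int → Nat → List Int → List Int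
  | 0, _, _, n2 => n2
  | f+1, n, i, n2 =>
    if n ≠ 0 then
      let n2' := n2.set i 1
      let n' := n - (2:Int)^i
      ten2twoGo f n' (findmax n') n2'
    else n2

def ten2two (n : Int) : List Int :=
  ten2twoGo (n.natAbs + 1) n (findmax n) (List.replicate 7 (0:Int))

-- while s != a[i]: i += 1  (returns the list length when s is absent; Python raises there, excluded by Pre_)
def scanA (s : Char) : List Char → Nat → Nat
  | [], i => i
  | c :: cs, i => if s ≠ c then scanA s cs (i+1) else i

def str2seq (S : String) (a : String) : List (List Int) :=
  S.toList.foldl (fun L s => L ++ [ten2two ((scanA s a.toList 0 : Nat) : Int)]) []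

-- ===== PORT B =====
def scanB (s : Char) : List Char → Nat → Nat
  | [], i => i
  | c :: cs, i => if s ≠ c then scanB s cs (i+1) else i

-- n2 = [0]*7; for bit in range(i.bit_length()): if (i >> bit) & 1: n2[bit] = 1
def bitsOf (i : Nat) : List Int :=
  (List.range (if i = 0 then 0 else Nat.log2 i + 1)).foldl
    (fun n2 bit => if (i >>> bit) &&& 1 = 1 then n2.set bit 1 else n2)
    (List.replicate 7 (0:Int))

def str2seq_alt (S : String) (a : String) : List (List Int) :=
  S.toList.foldl (fun L s => L ++ [bitsOf (scanB s a.toList 0)]) []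

-- ===== PRECONDITION & SPEC =====
-- Pre_ excludes exactly the inputs where Python A raises IndexError: a character of S absent from a
-- (the linear scan runs off the end of a), or whose first index in a is ≥ 128 (n2[i] with i ≥ 7).
def Pre_str2seq (S : String) (a : String) : Prop :=
  (S.toList.all (fun c => a.toList.contains c && decide (a.toList.idxOf c < 128))) = true

instance (S : String) (a : String) : Decidable (Pre_str2seq S a) := by
  unfold Pre_str2seq; infer_instance

def pvWitness_str2seq : String × String := ("baca", "abc")

def Spec_str2seq (S : String) (a : String) (out : List (List Int)) : Prop := out = str2seq_alt S a
instance (S : String) (a : String) (out : List (List Int)) : Decidable (Spec_str2seq S a out) := by unfold Spec_str2seq; infer_instance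

-- ===== CLAIM (what is proved, stated in full; the proofs are below) =====
def Claim_equal_str2seq : Prop := ∀ (S : String) (a : String), Dom_str2seq S a → Pre_str2seq S a → Spec_str2seq S a (str2seq S a)

-- ===== LEMMAS AND PROOFS =====

theorem scanB_eq_scanA (s : Char) (l : List Char) (i : Nat) : scanB s l i = scanA s l i := by
  induction l generalizing i with
  | nil => rfl
  | cons c cs ih => simp [scanA, scanB, ih]

theorem scanA_eq_idxOf (s : Char) (l : List Char) (i : Nat) (h : s ∈ l) :
    scanA s l i = i + l.idxOf s := by
  induction l generalizing i with
  | nil => cases h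
  | cons c cs ih =>
    by_cases hc : s = c
    · simp [scanA, hc]
    · have hm : s ∈ cs := by
        rcases List.mem_cons.mp h with h' | h'
        · exact absurd h' hc
        · exact h'
      have hne : (c == s) = false := by
        simp only [beq_eq_false_iff_ne, ne_eq]
        exact fun h' => hc h'.symm
      simp [scanA, hc, ih _ hm, List.idxOf, List.findIdx_cons, hne]
      omega

theorem ten2two_eq_bitsOf_lt128 : ∀ x : Fin 128, ten2two ((x.val : Nat) : Int) = bitsOf x.val := by
  decide

theorem foldl_app_congr (f g : Char → List Int) (l : List Char)
    (h : ∀ c ∈ l, f c = g c) :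
    ∀ L, l.foldl (fun L s => L ++ [f s]) L = l.foldl (fun L s => L ++ [g s]) L := by
  induction l with
  | nil => intro L; rfl
  | cons c cs ih =>
    intro L
    have hc := h c (List.mem_cons_self ..)
    simp only [List.foldl_cons, hc]
    exact ih (fun x hx => h x (List.mem_cons_of_mem _ hx)) _

-- ===== VERDICT (by name: the statement is the Claim_ definition above) =====
theorem str2seq_spec : Claim_equal_str2seq := by
  intro S a _ hPre
  unfold Spec_str2seq str2seq str2seq_alt
  refine foldl_app_congr _ _ _ ?_ []
  intro c hc
  have hPre' := List.all_eq_true.mp hPre c hc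
  rw [Bool.and_eq_true, List.contains_iff_mem, decide_eq_true_iff] at hPre'
  obtain ⟨hmem, hlt⟩ := hPre'
  have hidx : scanA c a.toList 0 = a.toList.idxOf c := by
    simpa using scanA_eq_idxOf c a.toList 0 hmem
  rw [scanB_eq_scanA, hidx]
  exact ten2two_eq_bitsOf_lt128 ⟨a.toList.idxOf c, hlt⟩
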